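-- pv_equiv track=rewrite | github.com/massi-tripp/Esg_Agent | RAG_full_bigger/2_document_reduction.py | cluster_pages
-- ===== SOURCE A (Python) =====
-- from typing import List, Tuple, Dict, Any, Optional
--
-- def cluster_pages(hit_pages: List[int], max_gap: int) -> List[List[int]]:
--     if not hit_pages:
--         return []
--     hit_pages = sorted(set(hit_pages))
--     clusters: List[List[int]] = []
--     cur = [hit_pages[0]]
--     for p in hit_pages[1:]:
--         if p - cur[-1] <= max_gap + 1:
--             cur.append(p)
--         else:
--             clusters.append(cur)
--             cur = [p]
--     clusters.append(cur)
--     return clusters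
-- ===== SOURCE B (Python) =====
-- def cluster_pages(hit_pages, max_gap):
--     pages = sorted(set(hit_pages))
--     if not pages:
--         return []
--     n = len(pages)
--     breaks = [i for i in range(1, n) if pages[i] - pages[i - 1] > max_gap + 1]
--     cuts = [0] + breaks + [n]
--     return [pages[a:b] for a, b in zip(cuts, cuts[1:])]
-- ===== Notes on version B (the rewrite author's own statement) =====
-- stated objective: alternative
-- what changed: Instead of one pass that incrementally appends to a running cluster, B first computes all break positions with an index comprehension, builds the list of cut points, and materializes each cluster by slicing the sorted page list.
import Mathlib
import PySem

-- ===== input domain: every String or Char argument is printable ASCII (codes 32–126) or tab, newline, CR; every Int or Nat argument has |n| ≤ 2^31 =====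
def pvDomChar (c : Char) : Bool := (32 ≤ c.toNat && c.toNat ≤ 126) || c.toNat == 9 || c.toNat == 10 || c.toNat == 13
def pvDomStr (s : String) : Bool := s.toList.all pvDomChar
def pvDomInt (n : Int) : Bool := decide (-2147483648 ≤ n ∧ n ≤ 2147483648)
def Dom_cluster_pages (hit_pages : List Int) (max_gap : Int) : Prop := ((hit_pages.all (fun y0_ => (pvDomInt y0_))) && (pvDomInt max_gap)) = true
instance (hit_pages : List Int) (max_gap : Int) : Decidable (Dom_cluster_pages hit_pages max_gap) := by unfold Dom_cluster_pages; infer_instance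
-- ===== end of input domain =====

-- B computes all break positions first and materializes clusters by slicing, instead of A's
-- single pass that appends to a running cluster; same return value (objective: alternative decomposition).

-- ===== PORT A =====
def cluster_pages (hit_pages : List Int) (max_gap : Int) : List (List Int) :=
  if hit_pages.isEmpty then []
  else
    let pages := PySem.List.sorted (PySem.Set.ofList hit_pages) (fun p => p) false
    let cur := [PySem.List.pyGetD pages 0 0]
    let r := (PySem.List.slice pages (some 1) none).foldl
      (fun (st : List (List Int) × List Int) p =>
        if p - PySem.List.pyGetD st.2 (-1) 0 ≤ max_gap + 1 then (st.1, st.2 ++ [p])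
        else (st.1 ++ [st.2], [p])) ([], cur)
    r.1 ++ [r.2]

-- ===== PORT B =====
def cluster_pages_alt (hit_pages : List Int) (max_gap : Int) : List (List Int) :=
  let pages := PySem.List.sorted (PySem.Set.ofList hit_pages) (fun p => p) false
  if pages.isEmpty then []
  else
    let breaks := (PySem.List.pyRange 1 (PySem.List.len pages) 1).filter
      (fun i => decide (PySem.List.pyGetD pages i 0 - PySem.List.pyGetD pages (i - 1) 0 > max_gap + 1))
    let cuts := [0] ++ breaks ++ [PySem.List.len pages]
    (cuts.zip cuts.tail).map (fun ab => PySem.List.slice pages (some ab.1) (some ab.2))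

-- ===== PRECONDITION & SPEC =====
def Spec_cluster_pages (hit_pages : List Int) (max_gap : Int) (out : List (List Int)) : Prop := out = cluster_pages_alt hit_pages max_gap
instance (hit_pages : List Int) (max_gap : Int) (out : List (List Int)) : Decidable (Spec_cluster_pages hit_pages max_gap out) := by unfold Spec_cluster_pages; infer_instance

-- ===== CLAIM (what is proved, stated in full; the proofs are below) =====
def Claim_equal_cluster_pages : Prop := ∀ (hit_pages : List Int) (max_gap : Int), Dom_cluster_pages hit_pages max_gap → Spec_cluster_pages hit_pages max_gap (cluster_pages hit_pages max_gap)

-- ===== LEMMAS AND PROOFS =====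

-- common recursive specification of the grouping: given x (the last element already placed in
-- the current cluster) and the remaining sorted pages, returns (tail of current cluster, later clusters)
def gtp (g : Int) : Int → List Int → List Int × List (List Int)
  | _, [] => ([], [])
  | x, y :: ys =>
    let r := gtp g y ys
    if y - x ≤ g + 1 then (y :: r.1, r.2) else ([], (y :: r.1) :: r.2)


def brks (g : Int) (pages : List Int) : List Int :=
  (PySem.List.pyRange 1 (PySem.List.len pages) 1).filter
    (fun i => decide (PySem.List.pyGetD pages i 0 - PySem.List.pyGetD pages (i - 1) 0 > g + 1))

theorem getD_shift (a : Int) (l : List Int) (i : Int) (hi : 0 ≤ i) :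
    PySem.List.pyGetD (a :: l) (i + 1) 0 = PySem.List.pyGetD l i 0 := by
  obtain ⟨n, rfl⟩ : ∃ n : Nat, i = (n : Int) := ⟨i.toNat, (Int.toNat_of_nonneg hi).symm⟩
  have h1 : ((n : Int) + 1) = ((n + 1 : Nat) : Int) := by push_cast; ring
  rw [h1, PySem.List.pyGetD_natCast, PySem.List.pyGetD_natCast]
  simp

theorem pyRange_shift (b : Int) : PySem.List.pyRange 2 b = (PySem.List.pyRange 1 (b-1)).map (· + 1) := by
  rw [PySem.List.pyRange_one, PySem.List.pyRange_one, List.map_map]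
  have h : (b - 2).toNat = (b - 1 - 1).toNat := by omega
  rw [h]
  apply List.map_congr_left
  intro k _
  dsimp only [Function.comp]
  omega

theorem brks_shift (g x y : Int) (ys : List Int) :
    brks g (x :: y :: ys) =
      (if y - x > g + 1 then [(1 : Int)] else []) ++ (brks g (y :: ys)).map (· + 1) := by
  unfold brks
  have hlen : PySem.List.len (x :: y :: ys) = ((ys.length : Int) + 2) := by
    simp [PySem.List.len_eq]; omega
  have hlen2 : PySem.List.len (y :: ys) = ((ys.length : Int) + 1) := by
    simp [PySem.List.len_eq]
  rw [hlen, hlen2]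
  rw [PySem.List.pyRange_one_cons (by omega)]
  rw [show (1 : Int) + 1 = 2 from by norm_num]
  rw [show ((ys.length : Int) + 2) = ((ys.length : Int) + 1 + 1) from by ring, pyRange_shift]
  rw [show ((ys.length : Int) + 1 + 1 - 1) = ((ys.length : Int) + 1) from by ring]
  rw [List.filter_cons, List.filter_map]
  have hfc : List.filter ((fun i => decide (PySem.List.pyGetD (x :: y :: ys) i 0 - PySem.List.pyGetD (x :: y :: ys) (i - 1) 0 > g + 1)) ∘ (· + 1)) (PySem.List.pyRange 1 ((ys.length : Int) + 1))
      = List.filter (fun i => decide (PySem.List.pyGetD (y :: ys) i 0 - PySem.List.pyGetD (y :: ys) (i - 1) 0 > g + 1)) (PySem.List.pyRange 1 ((ys.length : Int) + 1)) := by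
    apply List.filter_congr
    intro i hi
    rw [PySem.List.mem_pyRange_one] at hi
    simp only [Function.comp]
    rw [getD_shift _ _ _ (by omega)]
    rw [show i + 1 - 1 = (i - 1) + 1 from by ring, getD_shift _ _ _ (by omega)]
  rw [hfc]
  have hP1 : (PySem.List.pyGetD (x :: y :: ys) 1 0 - PySem.List.pyGetD (x :: y :: ys) (1 - 1) 0 > g + 1)
      = (y - x > g + 1) := by
    rw [show ((1:Int)) = ((0:Int) + 1) from by ring, getD_shift _ _ _ le_rfl]
    norm_num [PySem.List.pyGetD_zero_cons]
  simp only [hP1]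
  by_cases h : y - x > g + 1
  · simp only [h, decide_true, if_true, List.singleton_append]
  · simp [h]


def Bcore (g : Int) (pages : List Int) : List (List Int) :=
  let cuts := [0] ++ brks g pages ++ [PySem.List.len pages]
  (cuts.zip cuts.tail).map (fun ab => PySem.List.slice pages (some ab.1) (some ab.2))

theorem slice_shift (c : Int) (l : List Int) (a b : Int) (ha : 0 ≤ a) (hb : 0 ≤ b) :
    PySem.List.slice (c :: l) (some (a + 1)) (some (b + 1)) = PySem.List.slice l (some a) (some b) := by
  rw [PySem.List.slice_toNat _ (by omega) (by omega), PySem.List.slice_toNat _ ha hb]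
  have h1 : (a + 1).toNat = a.toNat + 1 := by omega
  have h2 : (b + 1).toNat = b.toNat + 1 := by omega
  simp [h1, h2]

theorem mem_brks (g : Int) (p : List Int) (i : Int) (h : i ∈ brks g p) :
    1 ≤ i ∧ i < (p.length : Int) := by
  unfold brks at h
  have := (List.mem_filter.mp h).1
  rw [PySem.List.mem_pyRange_one] at this
  simpa [PySem.List.len_eq] using this

theorem map_slice_shift (c : Int) (l : List Int) (u v : List Int)
    (hu : ∀ a ∈ u, 0 ≤ a) (hv : ∀ b ∈ v, 0 ≤ b) :
    ((u.map (· + 1)).zip (v.map (· + 1))).map (fun ab => PySem.List.slice (c :: l) (some ab.1) (some ab.2))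
      = (u.zip v).map (fun ab => PySem.List.slice l (some ab.1) (some ab.2)) := by
  rw [List.zip_map, List.map_map]
  apply List.map_congr_left
  intro ab hab
  obtain ⟨ha, hb⟩ := List.of_mem_zip hab
  simp only [Function.comp, Prod.map]
  exact slice_shift c l ab.1 ab.2 (hu _ ha) (hv _ hb)

theorem B_main (g : Int) : ∀ (xs : List Int) (x : Int),
    Bcore g (x :: xs) = (x :: (gtp g x xs).1) :: (gtp g x xs).2 := by
  intro xs
  induction xs with
  | nil =>
    intro x
    simp [Bcore, brks, gtp, PySem.List.len_eq, PySem.List.pyRange_one_eq_nil le_rfl,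
      PySem.List.slice_toNat _ (le_refl (0:Int)) (by norm_num : (0:Int) ≤ 1)]
  | cons y ys ih =>
    intro x
    have hlen1 : PySem.List.len (x :: y :: ys) = PySem.List.len (y :: ys) + 1 := by
      simp [PySem.List.len_eq]
    have htail_nonneg : ∀ b ∈ brks g (y :: ys) ++ [PySem.List.len (y :: ys)], 0 ≤ b := by
      intro b hb
      rcases List.mem_append.mp hb with hb | hb
      · exact le_trans (by norm_num) (mem_brks g _ b hb).1
      · simp only [List.mem_singleton] at hb
        subst hb
        simp only [PySem.List.len_eq]
        positivity
    have hcuts_nonneg : ∀ a ∈ (0 : Int) :: (brks g (y :: ys) ++ [PySem.List.len (y :: ys)]), 0 ≤ a := by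
      intro a ha
      rcases List.mem_cons.mp ha with rfl | ha
      · exact le_rfl
      · exact htail_nonneg a ha
    unfold Bcore
    rw [brks_shift, hlen1]
    by_cases h : y - x > g + 1
    · simp only [h, if_pos]
      have hgt : ¬ (y - x ≤ g + 1) := by omega
      simp only [List.cons_append, List.nil_append]
      have e1 : (1 : Int) :: ((brks g (y :: ys)).map (fun x => x + 1) ++ [PySem.List.len (y :: ys) + 1])
          = ((0 : Int) :: (brks g (y :: ys) ++ [PySem.List.len (y :: ys)])).map (fun x => x + 1) := by simp
      have e2 : ((brks g (y :: ys)).map (fun x => x + 1) ++ [PySem.List.len (y :: ys) + 1])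
          = (brks g (y :: ys) ++ [PySem.List.len (y :: ys)]).map (fun x => x + 1) := by simp
      simp only [List.tail_cons, List.zip_cons_cons, List.map_cons]
      rw [e1, e2]
      rw [map_slice_shift x (y :: ys) _ _ hcuts_nonneg htail_nonneg]
      have hB : Bcore g (y :: ys) = (((0 : Int) :: (brks g (y :: ys) ++ [PySem.List.len (y :: ys)])).zip
          (brks g (y :: ys) ++ [PySem.List.len (y :: ys)])).map
          (fun ab => PySem.List.slice (y :: ys) (some ab.1) (some ab.2)) := by
        simp [Bcore]
      rw [← hB, ih y]
      have hhead : PySem.List.slice (x :: y :: ys) (some 0) (some 1) = [x] := by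
        rw [PySem.List.slice_toNat _ le_rfl (by norm_num)]
        simp
      simp [gtp, hgt, hhead]
    · have hle : y - x ≤ g + 1 := by omega
      obtain ⟨t0, tr, htl⟩ := List.exists_cons_of_ne_nil
        (show brks g (y :: ys) ++ [PySem.List.len (y :: ys)] ≠ [] by simp)
      rw [htl] at htail_nonneg
      have ht0 : 0 ≤ t0 := htail_nonneg t0 List.mem_cons_self
      have htr : ∀ b ∈ tr, 0 ≤ b := fun b hb => htail_nonneg b (List.mem_cons_of_mem _ hb)
      rw [if_neg h]
      simp only [List.nil_append]
      have e2 : ((brks g (y :: ys)).map (fun x => x + 1) ++ [PySem.List.len (y :: ys) + 1])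
          = (t0 :: tr).map (fun x => x + 1) := by rw [← htl]; simp
      simp only [List.cons_append, List.nil_append]
      rw [e2]
      simp only [List.map_cons, List.tail_cons, List.zip_cons_cons, List.map_cons]
      rw [show ((t0 + 1) :: tr.map (fun x => x + 1)) = (t0 :: tr).map (fun x => x + 1) from by simp]
      rw [map_slice_shift x (y :: ys) _ _ htail_nonneg htr]
      have hB : Bcore g (y :: ys) = (((0 : Int) :: (t0 :: tr)).zip (t0 :: tr)).map
          (fun ab => PySem.List.slice (y :: ys) (some ab.1) (some ab.2)) := by
        unfold Bcore
        simp only [List.cons_append, List.nil_append, List.tail_cons]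
        rw [htl]
      have hI := ih y
      rw [hB] at hI
      simp only [List.zip_cons_cons, List.map_cons] at hI
      obtain ⟨hI1, hI2⟩ := List.cons_eq_cons.mp hI
      have hhead : PySem.List.slice (x :: y :: ys) (some 0) (some (t0 + 1))
          = x :: PySem.List.slice (y :: ys) (some 0) (some t0) := by
        rw [PySem.List.slice_toNat _ le_rfl (by omega), PySem.List.slice_toNat _ le_rfl ht0]
        have : (t0 + 1).toNat = t0.toNat + 1 := by omega
        simp [this]
      simp [gtp, hle, hhead, hI1, hI2]

theorem A_fold (g : Int) : ∀ (xs : List Int) (cl : List (List Int)) (cur : List Int) (x : Int),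
    (let r := xs.foldl
      (fun (st : List (List Int) × List Int) p =>
        if p - PySem.List.pyGetD st.2 (-1) 0 ≤ g + 1 then (st.1, st.2 ++ [p])
        else (st.1 ++ [st.2], [p])) (cl, cur ++ [x]);
     r.1 ++ [r.2]) = cl ++ ((cur ++ x :: (gtp g x xs).1) :: (gtp g x xs).2) := by
  intro xs
  induction xs with
  | nil => intro cl cur x; simp [gtp]
  | cons y ys ih =>
    intro cl cur x
    simp only [List.foldl_cons, PySem.List.pyGetD_neg_one_append_singleton]
    by_cases h : y - x ≤ g + 1
    · simp only [h, if_pos]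
      have := ih cl (cur ++ [x]) y
      rw [List.append_assoc] at this ⊢
      simp only at this
      rw [this]
      simp [gtp, h]
    · simp only [h, if_false]
      have := ih (cl ++ [cur ++ [x]]) [] y
      have h0 : ([] : List Int) ++ [y] = [y] := rfl
      rw [h0] at this
      simp only at this
      rw [this]
      simp [gtp, h]

theorem alt_eq (hit_pages : List Int) (max_gap : Int) :
    cluster_pages_alt hit_pages max_gap =
      (if (PySem.List.sorted (PySem.Set.ofList hit_pages) (fun p => p) false).isEmpty then []
       else Bcore max_gap (PySem.List.sorted (PySem.Set.ofList hit_pages) (fun p => p) false)) := rfl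

-- ===== VERDICT (by name: the statement is the Claim_ definition above) =====
theorem cluster_pages_spec : Claim_equal_cluster_pages := by
  intro hit_pages max_gap _
  unfold Spec_cluster_pages
  cases hit_pages with
  | nil => rfl
  | cons a l =>
    rw [alt_eq]
    have ha : a ∈ PySem.List.sorted (PySem.Set.ofList (a :: l)) (fun p => p) false := by
      rw [PySem.List.mem_sorted]
      exact (PySem.Set.mem_ofList _ _).mpr List.mem_cons_self
    have hne : PySem.List.sorted (PySem.Set.ofList (a :: l)) (fun p => p) false ≠ [] :=
      List.ne_nil_of_mem ha
    obtain ⟨x, xs, hx⟩ := List.exists_cons_of_ne_nil hne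
    unfold cluster_pages
    rw [hx]
    simp only [List.isEmpty_cons, Bool.false_eq_true, if_false,
      PySem.List.pyGetD_zero_cons, PySem.List.slice_from_one, List.tail_cons]
    have hA := A_fold max_gap xs [] [] x
    simp only [List.nil_append] at hA
    rw [hA, B_main max_gap xs x]
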